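-- pv_equiv track=rewrite | github.com/o-rumiantsev/decision-support | lab2/part1.py | get_blockers_by_R_strict
-- ===== SOURCE A (Python) =====
-- def get_blockers_by_R_strict(relation):
--     blockers = []
--     for j in range(0, len(relation)):
--         is_blocker = True
--         for i in range(0, len(relation)):
--             if relation[i][j] != 0 and j != i:
--                 is_blocker = False
--                 break
--         if is_blocker:
--             blockers.append(j + 1)
--     return blockers
-- ===== SOURCE B (Python) =====
-- def get_blockers_by_R_strict(relation):
--     n = len(relation)
--     disqualified = set()
--     for i in range(n):
--         for j in range(n):
--             if relation[i][j] != 0 and i != j: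
--                 disqualified.add(j)
--     return [j + 1 for j in range(n) if j not in disqualified]
-- ===== Notes on version B (the rewrite author's own statement) =====
-- stated objective: alternative
-- what changed: Replaces A's per-column verification loop with early break by a single full-grid sweep that collects disqualified column indices into a set, followed by a separate output pass over the indices.
-- outside the precondition, e.g. on get_blockers_by_R_strict([[0, 1], [5]]): A returns [], B raises IndexError
import Mathlib
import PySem

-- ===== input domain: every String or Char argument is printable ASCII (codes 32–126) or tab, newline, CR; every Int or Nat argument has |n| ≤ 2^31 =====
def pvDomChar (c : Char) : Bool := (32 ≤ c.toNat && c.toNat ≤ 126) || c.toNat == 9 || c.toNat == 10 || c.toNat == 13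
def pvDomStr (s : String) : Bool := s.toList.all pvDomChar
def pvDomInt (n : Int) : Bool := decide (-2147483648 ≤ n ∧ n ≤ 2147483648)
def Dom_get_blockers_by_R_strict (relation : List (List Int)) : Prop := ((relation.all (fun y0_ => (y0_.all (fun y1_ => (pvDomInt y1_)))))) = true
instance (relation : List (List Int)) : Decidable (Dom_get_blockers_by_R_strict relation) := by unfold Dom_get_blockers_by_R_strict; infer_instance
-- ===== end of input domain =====

-- B replaces A's per-column check-with-break by one full-grid sweep collecting disqualified columns into a set, then a separate output pass (alternative decomposition, same cost).
-- Pre_ excludes ragged matrices (a row shorter than the number of rows): there A may return early thanks to its break while B's full sweep raises IndexError.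


-- ===== PORT A =====
-- inner 'for i' loop with break: returns is_blocker
def pvA_isBlocker (relation : List (List Int)) (j : Int) : List Int → Bool
  | [] => true
  | i :: rest =>
      if PySem.List.pyGetD (PySem.List.pyGetD relation i []) j 0 ≠ 0 ∧ j ≠ i then false
      else pvA_isBlocker relation j rest

def get_blockers_by_R_strict (relation : List (List Int)) : List Int :=
  (PySem.List.pyRange 0 relation.length 1).foldl
    (fun blockers j =>
      if pvA_isBlocker relation j (PySem.List.pyRange 0 relation.length 1)
      then blockers ++ [j + 1] else blockers) []

-- ===== PORT B =====
def get_blockers_by_R_strict_alt (relation : List (List Int)) : List Int :=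
  let idx := PySem.List.pyRange 0 relation.length 1
  let dq : PySem.Set Int := idx.foldl (fun s i =>
      idx.foldl (fun s j =>
        if PySem.List.pyGetD (PySem.List.pyGetD relation i []) j 0 ≠ 0 ∧ i ≠ j
        then PySem.Set.add s j else s) s) PySem.Set.empty
  idx.foldl (fun out j => if j ∉ dq then out ++ [j + 1] else out) []

-- ===== PRECONDITION & SPEC =====
-- Pre_ excludes ragged matrices (a row shorter than the number of rows): on those Python A
-- either raises IndexError itself or (via its break) returns where B raises.
def Pre_get_blockers_by_R_strict (relation : List (List Int)) : Prop :=
  ∀ row ∈ relation, relation.length ≤ row.length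
instance (relation : List (List Int)) : Decidable (Pre_get_blockers_by_R_strict relation) := by
  unfold Pre_get_blockers_by_R_strict; infer_instance

def pvWitness_get_blockers_by_R_strict : List (List Int) := [[0, 1, 0], [0, 0, 0], [2, 0, 0]]

def Spec_get_blockers_by_R_strict (relation : List (List Int)) (out : List Int) : Prop := out = get_blockers_by_R_strict_alt relation
instance (relation : List (List Int)) (out : List Int) : Decidable (Spec_get_blockers_by_R_strict relation out) := by unfold Spec_get_blockers_by_R_strict; infer_instance

-- ===== CLAIM (what is proved, stated in full; the proofs are below) =====
def Claim_equal_get_blockers_by_R_strict : Prop := ∀ (relation : List (List Int)), Dom_get_blockers_by_R_strict relation → Pre_get_blockers_by_R_strict relation → Spec_get_blockers_by_R_strict relation (get_blockers_by_R_strict relation)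

-- ===== LEMMAS AND PROOFS =====

-- A's inner loop (break included) computes: no index in l witnesses a nonzero off-diagonal entry in column j
theorem pvA_isBlocker_eq (relation : List (List Int)) (j : Int) (l : List Int) :
    pvA_isBlocker relation j l
      = !l.any (fun i => decide (PySem.List.pyGetD (PySem.List.pyGetD relation i []) j 0 ≠ 0 ∧ j ≠ i)) := by
  induction l with
  | nil => rfl
  | cons i rest ih =>
      by_cases h : PySem.List.pyGetD (PySem.List.pyGetD relation i []) j 0 ≠ 0 ∧ j ≠ i
      · simp [pvA_isBlocker, h]
      · simp [pvA_isBlocker, if_neg h, ih]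
        tauto

-- membership in a conditional Set.add fold
theorem mem_foldl_add_if (p : Int → Int → Prop) [inst : ∀ a b, Decidable (p a b)]
    (l : List Int) (i : Int) (s0 : PySem.Set Int) (x : Int) :
    (x ∈ l.foldl (fun s j => if p i j then PySem.Set.add s j else s) s0)
      ↔ x ∈ s0 ∨ (x ∈ l ∧ p i x) := by
  induction l generalizing s0 with
  | nil => simp
  | cons j rest ih =>
      simp only [List.foldl_cons, List.mem_cons]
      by_cases h : p i j
      · rw [if_pos h, ih]
        simp only [PySem.Set.mem_add]
        constructor
        · rintro ((hs | he) | ⟨hm, hp⟩)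
          · exact Or.inl hs
          · exact Or.inr ⟨Or.inl he, he ▸ h⟩
          · exact Or.inr ⟨Or.inr hm, hp⟩
        · rintro (hs | ⟨(he | hm), hp⟩)
          · exact Or.inl (Or.inl hs)
          · exact Or.inl (Or.inr he)
          · exact Or.inr ⟨hm, hp⟩
      · rw [if_neg h, ih]
        constructor
        · rintro (hs | ⟨hm, hp⟩)
          · exact Or.inl hs
          · exact Or.inr ⟨Or.inr hm, hp⟩
        · rintro (hs | ⟨(he | hm), hp⟩)
          · exact Or.inl hs
          · exact absurd (he ▸ hp) h
          · exact Or.inr ⟨hm, hp⟩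

-- membership in the nested disqualification fold
theorem mem_foldl_foldl_add_if (p : Int → Int → Prop) [inst : ∀ a b, Decidable (p a b)]
    (l1 l2 : List Int) (s0 : PySem.Set Int) (x : Int) :
    (x ∈ l1.foldl (fun s i => l2.foldl (fun s j => if p i j then PySem.Set.add s j else s) s) s0)
      ↔ x ∈ s0 ∨ ∃ i ∈ l1, x ∈ l2 ∧ p i x := by
  induction l1 generalizing s0 with
  | nil => simp
  | cons i rest ih =>
      simp only [List.foldl_cons, List.mem_cons]
      rw [ih, mem_foldl_add_if p l2 i s0 x]
      constructor
      · rintro ((hs | ⟨hm, hp⟩) | ⟨i', hi', hm, hp⟩)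
        · exact Or.inl hs
        · exact Or.inr ⟨i, Or.inl rfl, hm, hp⟩
        · exact Or.inr ⟨i', Or.inr hi', hm, hp⟩
      · rintro (hs | ⟨i', (rfl | hi'), hm, hp⟩)
        · exact Or.inl (Or.inl hs)
        · exact Or.inl (Or.inr ⟨hm, hp⟩)
        · exact Or.inr ⟨i', hi', hm, hp⟩

-- ===== VERDICT (by name: the statement is the Claim_ definition above) =====
theorem get_blockers_by_R_strict_spec : Claim_equal_get_blockers_by_R_strict := by
  intro relation _ _
  show get_blockers_by_R_strict relation = get_blockers_by_R_strict_alt relation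
  unfold get_blockers_by_R_strict get_blockers_by_R_strict_alt
  simp only []
  set idx := PySem.List.pyRange 0 relation.length 1 with hidx
  set g := fun i j => PySem.List.pyGetD (PySem.List.pyGetD relation i []) j 0 with hg
  rw [PySem.List.foldl_append_ite (p := fun j => pvA_isBlocker relation j idx = true)
        (f := fun j => j + 1),
      PySem.List.foldl_append_ite
        (p := fun j => j ∉ idx.foldl (fun s i =>
            idx.foldl (fun s j => if g i j ≠ 0 ∧ i ≠ j then PySem.Set.add s j else s) s)
            PySem.Set.empty)
        (f := fun j => j + 1)]
  simp only [List.nil_append]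
  congr 1
  apply List.filter_congr
  intro j hj
  simp only [decide_eq_decide]
  rw [mem_foldl_foldl_add_if (fun i j => g i j ≠ 0 ∧ i ≠ j) idx idx PySem.Set.empty j]
  rw [pvA_isBlocker_eq]
  simp only [Bool.not_eq_eq_eq_not, Bool.not_true, List.any_eq_false, decide_eq_true_eq,
    PySem.Set.empty, List.not_mem_nil, false_or]
  constructor
  · rintro h ⟨i, hi, -, hgi, hij⟩
    exact (h i hi) ⟨hgi, fun e => hij e.symm⟩
  · intro h i hi hc
    exact h ⟨i, hi, hj, hc.1, fun e => hc.2 e.symm⟩
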